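-- pv_equiv track=rewrite | github.com/htoisancoder/SFU-AI-Hackathon | image_searcher.py | generate_diagonal_order
-- ===== SOURCE A (Python) =====
-- def generate_diagonal_order(size):
--     """Generate diagonal scanning order with 90-degree rotation offsets"""
--     order = []
--     # Calculate diagonal starting points
--     for diag in range(2 * size - 1):
--         if diag < size:
--             start_row = size - 1 - diag
--             start_col = size - 1
--         else:
--             start_row = 0
--             start_col = 2 * size - 2 - diag
--
--         # Process diagonal from bottom-right to top-left
--         row, col = start_row, start_col
--         while row < size and col >= 0:
--             order.append((row, col))
--             row += 1
--             col -= 1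
--
--     return order
-- ===== SOURCE B (Python) =====
-- def generate_diagonal_order(size):
--     """Generate diagonal scanning order with 90-degree rotation offsets"""
--     coords = [(r, c) for r in range(size) for c in range(size)]
--     return sorted(coords, key=lambda p: (-(p[0] + p[1]), p[0]))
-- ===== Notes on version B (the rewrite author's own statement) =====
-- stated objective: idiomatic
-- what changed: Replaces the per-diagonal start-point walk (outer diag loop plus inner while that steps row+1/col-1) by generating all grid coordinates once and stably sorting them by the diagonal key (-(r+c), r).
import Mathlib
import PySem

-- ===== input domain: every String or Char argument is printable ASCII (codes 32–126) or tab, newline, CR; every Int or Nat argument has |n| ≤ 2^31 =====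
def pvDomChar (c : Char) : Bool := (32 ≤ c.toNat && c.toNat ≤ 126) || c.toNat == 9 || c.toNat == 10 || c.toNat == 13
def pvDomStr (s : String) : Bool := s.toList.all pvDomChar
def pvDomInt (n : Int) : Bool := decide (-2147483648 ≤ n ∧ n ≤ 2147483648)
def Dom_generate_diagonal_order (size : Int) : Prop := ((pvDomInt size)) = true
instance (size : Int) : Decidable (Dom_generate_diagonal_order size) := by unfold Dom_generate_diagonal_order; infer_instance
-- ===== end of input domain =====

-- B replaces A's per-diagonal start-point walk by building the whole grid once and
-- stably sorting it by the diagonal key (-(r+c), r) — more idiomatic, not faster.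

-- ===== PORT A =====
-- the inner 'while row < size and col >= 0' loop, appending to order
def pvWalkA (size row col : Int) (order : List (Int × Int)) : List (Int × Int) :=
  if _h : row < size ∧ 0 ≤ col then
    pvWalkA size (row + 1) (col - 1) (order ++ [(row, col)])
  else order
termination_by (col + 1).toNat
decreasing_by omega

def generate_diagonal_order (size : Int) : List (Int × Int) :=
  (PySem.List.pyRange 0 (2 * size - 1) 1).foldl
    (fun order diag =>
      let start : Int × Int :=
        if diag < size then (size - 1 - diag, size - 1)
        else (0, 2 * size - 2 - diag)
      pvWalkA size start.1 start.2 order)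
    []

-- ===== PORT B =====
def generate_diagonal_order_alt (size : Int) : List (Int × Int) :=
  let coords := (PySem.List.pyRange 0 size 1).flatMap
    (fun r => (PySem.List.pyRange 0 size 1).map (fun c => (r, c)))
  PySem.List.sorted2 coords (fun p => -(p.1 + p.2)) (fun p => p.1)

-- ===== PRECONDITION & SPEC =====
def Spec_generate_diagonal_order (size : Int) (out : List (Int × Int)) : Prop := out = generate_diagonal_order_alt size
instance (size : Int) (out : List (Int × Int)) : Decidable (Spec_generate_diagonal_order size out) := by unfold Spec_generate_diagonal_order; infer_instance

-- ===== CLAIM (what is proved, stated in full; the proofs are below) =====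
def Claim_equal_generate_diagonal_order : Prop := ∀ (size : Int), Dom_generate_diagonal_order size → Spec_generate_diagonal_order size (generate_diagonal_order size)

-- ===== LEMMAS AND PROOFS =====

-- A's walk, in closed form: rows from its start up to the first failing bound, constant sum
lemma pvWalkA_spec (size row col : Int) (order : List (Int × Int)) :
    pvWalkA size row col order =
      order ++ (PySem.List.pyRange row (min size (row + col + 1)) 1).map
        (fun r => (r, row + col - r)) := by
  fun_induction pvWalkA size row col order with
  | case1 row col order h ih =>
    rw [ih]
    have h2 : row + 1 + (col - 1) = row + col := by ring
    rw [h2, PySem.List.pyRange_one_cons (a := row) (b := min size (row + col + 1)) (by omega)]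
    have h3 : row + col - row = col := by ring
    simp [h3]
  | case2 row col order h =>
    rw [PySem.List.pyRange_one_eq_nil (by omega)]
    simp

-- A as one flatMap over sums 2*size-2-d, rows max 0 (size-1-d) to min size (2*size-1-d)
def pvDiagL (size d : Int) : List (Int × Int) :=
  (PySem.List.pyRange (max 0 (size - 1 - d)) (min size (2 * size - 1 - d)) 1).map
    (fun r => (r, 2 * size - 2 - d - r))

lemma A_flat (size : Int) :
    generate_diagonal_order size =
      (PySem.List.pyRange 0 (2 * size - 1) 1).flatMap (pvDiagL size) := by
  unfold generate_diagonal_order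
  rw [PySem.List.foldl_congr_mem (g := fun order d => order ++ pvDiagL size d)]
  · rw [PySem.List.foldl_append_eq_flatMap]; simp
  · intro acc d hd
    rw [PySem.List.mem_pyRange_one] at hd
    by_cases hds : d < size
    · simp only [if_pos hds]
      rw [pvWalkA_spec]
      unfold pvDiagL
      have h1 : size - 1 - d + (size - 1) = 2 * size - 2 - d := by ring
      have h2 : max 0 (size - 1 - d) = size - 1 - d := by omega
      have h3 : min size (size - 1 - d + (size - 1) + 1) = min size (2 * size - 1 - d) := by omega
      rw [h3, h2, h1]
    · simp only [if_neg hds]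
      rw [pvWalkA_spec]
      unfold pvDiagL
      simp only [zero_add]
      have h2 : max 0 (size - 1 - d) = 0 := by omega
      have h3 : min size (2 * size - 2 - d + 1) = min size (2 * size - 1 - d) := by omega
      rw [h3, h2]

-- the diagonal key, as Python's tuple order
def pvKey (p : Int × Int) : Lex (Int × Int) := toLex (-(p.1 + p.2), p.1)

lemma sorted2_eq_sorted_lex (xs : List (Int × Int)) :
    PySem.List.sorted2 xs (fun p => -(p.1 + p.2)) (fun p => p.1) =
      PySem.List.sorted xs pvKey := by
  unfold PySem.List.sorted2 PySem.List.sorted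
  simp only [Bool.false_eq_true, if_false]
  congr 1
  funext acc x
  congr 1
  funext a b
  simp only [pvKey, Prod.Lex.toLex_lt_toLex]
  rw [Bool.eq_iff_iff]
  simp only [Bool.or_eq_true, Bool.and_eq_true, Bool.not_eq_true', decide_eq_true_eq,
    decide_eq_false_iff_not]
  omega

lemma A_pairwise (size : Int) :
    ((PySem.List.pyRange 0 (2 * size - 1) 1).flatMap (pvDiagL size)).Pairwise
      (fun p q => pvKey p < pvKey q) := by
  rw [List.pairwise_flatMap]
  constructor
  · intro d _
    unfold pvDiagL
    rw [List.pairwise_map]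
    refine (PySem.List.pairwise_lt_pyRange_one _ _).imp ?_
    intro a b hab
    simp only [pvKey, Prod.Lex.toLex_lt_toLex]
    omega
  · refine (PySem.List.pairwise_lt_pyRange_one _ _).imp ?_
    intro d1 d2 hd x hx y hy
    unfold pvDiagL at hx hy
    simp only [List.mem_map, PySem.List.mem_pyRange_one] at hx hy
    obtain ⟨r1, hr1, rfl⟩ := hx
    obtain ⟨r2, hr2, rfl⟩ := hy
    simp only [pvKey, Prod.Lex.toLex_lt_toLex]
    omega

lemma grid_pairwise (size : Int) :
    ((PySem.List.pyRange 0 size 1).flatMap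
      (fun r => (PySem.List.pyRange 0 size 1).map (fun c => (r, c)))).Pairwise
      (fun p q => toLex p < toLex q) := by
  rw [List.pairwise_flatMap]
  constructor
  · intro r _
    rw [List.pairwise_map]
    refine (PySem.List.pairwise_lt_pyRange_one _ _).imp ?_
    intro a b hab
    exact Prod.Lex.toLex_lt_toLex.mpr (Or.inr ⟨rfl, hab⟩)
  · refine (PySem.List.pairwise_lt_pyRange_one _ _).imp ?_
    intro r1 r2 hr x hx y hy
    simp only [List.mem_map, PySem.List.mem_pyRange_one] at hx hy
    obtain ⟨c1, hc1, rfl⟩ := hx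
    obtain ⟨c2, hc2, rfl⟩ := hy
    simp only [Prod.Lex.toLex_lt_toLex]
    omega

lemma nodup_of_pairwise_keylt {κ : Type} [LinearOrder κ] (key : Int × Int → κ)
    (l : List (Int × Int)) (h : l.Pairwise (fun a b => key a < key b)) : l.Nodup := by
  refine h.imp ?_
  intro a b hab
  rintro rfl
  exact lt_irrefl _ hab

lemma mem_A_flat (size : Int) (p : Int × Int) :
    p ∈ (PySem.List.pyRange 0 (2 * size - 1) 1).flatMap (pvDiagL size) ↔
      0 ≤ p.1 ∧ p.1 < size ∧ 0 ≤ p.2 ∧ p.2 < size := by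
  obtain ⟨r, c⟩ := p
  unfold pvDiagL
  simp only [List.mem_flatMap, List.mem_map, PySem.List.mem_pyRange_one, Prod.mk.injEq]
  constructor
  · rintro ⟨d, hd, x, hx, rfl, rfl⟩
    omega
  · rintro ⟨h1, h2, h3, h4⟩
    exact ⟨2 * size - 2 - (r + c), by omega, r, by omega, rfl, by omega⟩

lemma mem_grid (size : Int) (p : Int × Int) :
    p ∈ (PySem.List.pyRange 0 size 1).flatMap
        (fun r => (PySem.List.pyRange 0 size 1).map (fun c => (r, c))) ↔
      0 ≤ p.1 ∧ p.1 < size ∧ 0 ≤ p.2 ∧ p.2 < size := by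
  obtain ⟨r, c⟩ := p
  simp only [List.mem_flatMap, List.mem_map, PySem.List.mem_pyRange_one, Prod.mk.injEq]
  constructor
  · rintro ⟨x, hx, y, hy, rfl, rfl⟩
    omega
  · rintro ⟨h1, h2, h3, h4⟩
    exact ⟨r, by omega, c, by omega, rfl, rfl⟩

-- ===== VERDICT (by name: the statement is the Claim_ definition above) =====
theorem generate_diagonal_order_spec : Claim_equal_generate_diagonal_order := by
  intro size _
  unfold Spec_generate_diagonal_order generate_diagonal_order_alt
  rw [sorted2_eq_sorted_lex, A_flat]
  refine (PySem.List.sorted_eq_of_perm_of_pairwise_lt _ _ _ ?_ (A_pairwise size)).symm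
  refine (List.perm_ext_iff_of_nodup ?_ ?_).mpr ?_
  · exact nodup_of_pairwise_keylt pvKey _ (A_pairwise size)
  · exact nodup_of_pairwise_keylt toLex _ (grid_pairwise size)
  · intro p
    rw [mem_A_flat, mem_grid]
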